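-- pv_equiv track=rewrite | github.com/chan0park/PCoNMT | src/prepare_data.py | get_src_align_count
-- ===== SOURCE A (Python) =====
-- from collections import Counter
--
-- def get_src_align_count(list_pairs, src_len):
--     res = [0] * src_len
--     src_idxs = [int(x.split("-")[0]) for x in list_pairs]
--     counts = Counter(src_idxs)
--     for s_idx, c in counts.items():
--         if c < 4:
--             res[s_idx] = c
--         else:
--             res[s_idx] = 4
--     return res
-- ===== SOURCE B (Python) =====
-- def get_src_align_count(list_pairs, src_len):
--     res = [0] * src_len
--     for x in list_pairs:
--         s_idx = int(x.split("-")[0])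
--         if res[s_idx] < 4:
--             res[s_idx] += 1
--     return res
-- ===== Notes on version B (the rewrite author's own statement) =====
-- stated objective: simpler
-- what changed: Replaced the two-phase 'build a Counter of all parsed indices, then scatter min(count,4) over its distinct keys' with a single pass over list_pairs that increments res[s_idx] in place, capping inline at 4 (no Counter, no second loop, no intermediate index list).
import Mathlib
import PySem

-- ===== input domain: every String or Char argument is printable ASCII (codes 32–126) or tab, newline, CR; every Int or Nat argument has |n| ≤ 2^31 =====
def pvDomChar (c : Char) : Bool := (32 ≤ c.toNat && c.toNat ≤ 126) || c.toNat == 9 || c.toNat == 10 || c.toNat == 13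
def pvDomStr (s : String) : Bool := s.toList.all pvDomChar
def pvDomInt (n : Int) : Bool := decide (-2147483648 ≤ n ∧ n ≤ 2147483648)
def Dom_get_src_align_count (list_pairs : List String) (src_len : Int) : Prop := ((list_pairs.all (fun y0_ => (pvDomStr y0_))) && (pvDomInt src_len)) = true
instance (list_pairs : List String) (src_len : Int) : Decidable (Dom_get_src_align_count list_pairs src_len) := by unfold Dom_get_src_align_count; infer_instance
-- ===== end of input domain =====

-- B replaces A's two-phase Counter-then-scatter with one pass that bumps res[s_idx] in place, capping at 4 inline (objective: simpler).

-- int(x.split("-")[0]): split? with sep "-" ≠ "" is always some and its result nonempty, so [0] is headD; none = ValueError (excluded by Pre_)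
def pvParse? (x : String) : Option Int :=
  PySem.Int.ofStr? (((PySem.Str.split? x "-").getD []).headD "")

-- ===== PORT A =====
def get_src_align_count (list_pairs : List String) (src_len : Int) : List Int :=
  let res := List.replicate src_len.toNat (0 : Int)
  let src_idxs := list_pairs.map (fun x => (pvParse? x).getD 0)
  let counts := PySem.Dict.counter src_idxs
  counts.items.foldl
    (fun r p => if p.2 < 4 then PySem.List.pySetD r p.1 p.2 else PySem.List.pySetD r p.1 4)
    res

-- ===== PORT B =====
def get_src_align_count_alt (list_pairs : List String) (src_len : Int) : List Int :=
  list_pairs.foldl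
    (fun r x =>
      let s_idx := (pvParse? x).getD 0
      if PySem.List.pyGetD r s_idx 0 < 4 then
        PySem.List.pySetD r s_idx (PySem.List.pyGetD r s_idx 0 + 1)
      else r)
    (List.replicate src_len.toNat (0 : Int))

-- ===== PRECONDITION & SPEC =====
-- A raises ValueError when some int(x.split("-")[0]) fails, and IndexError when a parsed index is out of range
-- (a parsed index is never negative: a leading '-' makes the first split field non-numeric); Pre_ admits exactly A's returning inputs.
def Pre_get_src_align_count (list_pairs : List String) (src_len : Int) : Prop :=
  ∀ x ∈ list_pairs, ((pvParse? x).any (fun i => decide (0 ≤ i ∧ i < src_len))) = true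
instance (list_pairs : List String) (src_len : Int) : Decidable (Pre_get_src_align_count list_pairs src_len) := by
  unfold Pre_get_src_align_count; infer_instance

def pvWitness_get_src_align_count : List String × Int := (["0-1", "1-0", "0-2"], 2)

def Spec_get_src_align_count (list_pairs : List String) (src_len : Int) (out : List Int) : Prop := out = get_src_align_count_alt list_pairs src_len
instance (list_pairs : List String) (src_len : Int) (out : List Int) : Decidable (Spec_get_src_align_count list_pairs src_len out) := by unfold Spec_get_src_align_count; infer_instance

-- ===== CLAIM (what is proved, stated in full; the proofs are below) =====
def Claim_equal_get_src_align_count : Prop := ∀ (list_pairs : List String) (src_len : Int), Dom_get_src_align_count list_pairs src_len → Pre_get_src_align_count list_pairs src_len → Spec_get_src_align_count list_pairs src_len (get_src_align_count list_pairs src_len)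



-- ===== LEMMAS AND PROOFS =====

lemma pvGetD_set (l : List Int) (i : Nat) (a : Int) (j : Nat) :
    (l.set i a).getD j 0 = if i = j ∧ i < l.length then a else l.getD j 0 := by
  simp [List.getD_eq_getElem?_getD, List.getElem?_set]
  split_ifs with h1 h2 h3 <;> simp_all
  · omega

-- B's loop: final cell j holds min(start + #occurrences of j, 4), provided every start cell is ≤ 4 and indices are in range.
lemma pvFoldB_getD (l : List Int) : ∀ (res : List Int),
    (∀ a ∈ l, 0 ≤ a ∧ a.toNat < res.length) →
    (∀ j : Nat, res.getD j 0 ≤ 4) →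
    ∀ j : Nat,
      (l.foldl (fun r i =>
          if PySem.List.pyGetD r i 0 < 4 then PySem.List.pySetD r i (PySem.List.pyGetD r i 0 + 1) else r) res).getD j 0
        = min (res.getD j 0 + ((l.map Int.toNat).count j : Int)) 4 := by
  induction l with
  | nil =>
    intro res _ h2 j
    have := h2 j
    simp only [List.foldl_nil, List.map_nil, List.count_nil, Nat.cast_zero, add_zero]
    omega
  | cons a t ih =>
    intro res h1 h2 j
    have ha := h1 a (by simp)
    simp only [List.foldl_cons, List.map_cons, List.count_cons,
      PySem.List.pyGetD_of_nonneg res 0 ha.1, PySem.List.pySetD_of_nonneg res _ ha.1]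
    by_cases hlt : res.getD a.toNat 0 < 4
    · rw [if_pos hlt]
      have hlen : (res.set a.toNat (res.getD a.toNat 0 + 1)).length = res.length := by simp
      rw [ih _ (by rw [hlen]; exact fun b hb => h1 b (by simp [hb]))
            (by intro j'; rw [pvGetD_set]; split_ifs with hs
                · omega
                · exact h2 j')]
      rw [pvGetD_set]
      by_cases hj : a.toNat = j
      · subst hj
        rw [if_pos ⟨rfl, ha.2⟩]
        simp only [beq_self_eq_true, if_true]
        push_cast
        omega
      · rw [if_neg (by tauto)]
        have hb : (a.toNat == j) = false := by rw [beq_eq_false_iff_ne]; omega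
        simp only [hb, Bool.false_eq_true, if_false]
        push_cast
        omega
    · rw [if_neg hlt]
      have h4 : res.getD a.toNat 0 = 4 := le_antisymm (h2 a.toNat) (by omega)
      rw [ih _ (fun b hb => h1 b (by simp [hb])) h2]
      by_cases hj : a.toNat = j
      · subst hj
        simp only [beq_self_eq_true, if_true, h4]
        push_cast
        omega
      · have hb : (a.toNat == j) = false := by rw [beq_eq_false_iff_ne]; omega
        simp only [hb, Bool.false_eq_true, if_false]
        push_cast
        omega

-- A's loop over distinct keys: cell j is the (unique) matching entry, capped at 4, else untouched.
lemma pvFoldA_getD (pairs : List (Int × Int)) : ∀ (res : List Int),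
    (pairs.map Prod.fst).Nodup →
    (∀ p ∈ pairs, 0 ≤ p.1 ∧ p.1.toNat < res.length) →
    ∀ j : Nat,
      (pairs.foldl
          (fun r p => if p.2 < 4 then PySem.List.pySetD r p.1 p.2 else PySem.List.pySetD r p.1 4) res).getD j 0
        = match pairs.find? (fun p => p.1.toNat == j) with
          | some p => min p.2 4
          | none => res.getD j 0 := by
  induction pairs with
  | nil => intro res _ _ j; simp
  | cons p t ih =>
    intro res hnd hb j
    have hp := hb p (by simp)
    have hstep : (if p.2 < 4 then PySem.List.pySetD res p.1 p.2 else PySem.List.pySetD res p.1 4)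
        = res.set p.1.toNat (min p.2 4) := by
      split_ifs with hc
      · rw [PySem.List.pySetD_of_nonneg res _ hp.1]
        congr 1
        omega
      · rw [PySem.List.pySetD_of_nonneg res _ hp.1]
        congr 1
        omega
    rw [List.map_cons] at hnd
    have hnd' := List.nodup_cons.1 hnd
    simp only [List.foldl_cons, hstep]
    rw [ih _ hnd'.2 (by intro q hq; have := hb q (by simp [hq]); simpa using this) j]
    rw [List.find?_cons]
    by_cases hj : p.1.toNat = j
    · have hbeq : (p.1.toNat == j) = true := by rw [beq_iff_eq]; exact hj
      rw [hbeq]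
      cases hfind : t.find? (fun q => q.1.toNat == j) with
      | some q =>
        exfalso
        have hqmem := List.mem_of_find?_eq_some hfind
        have hqeq : q.1.toNat = j := by
          have := List.find?_some hfind
          rwa [beq_iff_eq] at this
        have hq0 := hb q (by simp [hqmem])
        have heq : q.1 = p.1 := by omega
        exact hnd'.1 (heq ▸ List.mem_map_of_mem hqmem)
      | none =>
        simp only
        rw [pvGetD_set, if_pos ⟨hj, hj ▸ hp.2⟩]
    · have hbeq : (p.1.toNat == j) = false := by rw [beq_eq_false_iff_ne]; exact hj
      rw [hbeq]
      cases hfind : t.find? (fun q => q.1.toNat == j) with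
      | some q => simp only
      | none =>
        simp only
        rw [pvGetD_set, if_neg (by tauto)]

lemma pvFoldA_length (pairs : List (Int × Int)) : ∀ (res : List Int),
    (pairs.foldl
        (fun r p => if p.2 < 4 then PySem.List.pySetD r p.1 p.2 else PySem.List.pySetD r p.1 4) res).length
      = res.length := by
  induction pairs with
  | nil => intro res; rfl
  | cons p t ih =>
    intro res
    simp only [List.foldl_cons]
    rw [ih]
    split <;> rw [PySem.List.length_pySetD]

lemma pvFoldB_length (l : List Int) : ∀ (res : List Int),
    (l.foldl (fun r i =>
        if PySem.List.pyGetD r i 0 < 4 then PySem.List.pySetD r i (PySem.List.pyGetD r i 0 + 1) else r) res).length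
      = res.length := by
  induction l with
  | nil => intro res; rfl
  | cons a t ih =>
    intro res
    simp only [List.foldl_cons]
    rw [ih]
    split
    · rw [PySem.List.length_pySetD]
    · rfl

lemma pvFind_nonneg (j : Nat) (s : List Int) (h : ∀ k ∈ s, 0 ≤ k) :
    s.find? (fun k => k.toNat == j) = if (j : Int) ∈ s then some ((j : Int)) else none := by
  induction s with
  | nil => simp
  | cons a t ih =>
    have ha := h a (by simp)
    rw [List.find?_cons]
    by_cases hj : a = (j : Int)
    · have hbeq : (a.toNat == j) = true := by rw [beq_iff_eq]; omega
      rw [hbeq, if_pos (by simp [hj])]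
      rw [hj]
    · have hbeq : (a.toNat == j) = false := by rw [beq_eq_false_iff_ne]; omega
      rw [hbeq, ih (fun k hk => h k (by simp [hk]))]
      have hne : ¬((j : Int) = a) := fun hh => hj hh.symm
      by_cases hm : (j : Int) ∈ t
      · rw [if_pos hm, if_pos (by simp [hm])]
      · rw [if_neg hm, if_neg (by simp [hne, hm])]

lemma pvCount_toNat (j : Nat) (l : List Int) (h : ∀ a ∈ l, 0 ≤ a) :
    (l.map Int.toNat).count j = l.count ((j : Int)) := by
  induction l with
  | nil => rfl
  | cons a t ih =>
    have ha := h a (by simp)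
    simp only [List.map_cons, List.count_cons]
    rw [ih (fun b hb => h b (by simp [hb]))]
    congr 1
    by_cases hj : a = (j : Int)
    · have h1 : (a.toNat == j) = true := by rw [beq_iff_eq]; omega
      have h2 : (a == (j : Int)) = true := by rw [beq_iff_eq]; exact hj
      rw [h1, h2]
    · have h1 : (a.toNat == j) = false := by rw [beq_eq_false_iff_ne]; omega
      have h2 : (a == (j : Int)) = false := by rw [beq_eq_false_iff_ne]; exact hj
      rw [h1, h2]


lemma pvBridge (lp : List String) (init : List Int) :
    lp.foldl (fun r x =>
        if PySem.List.pyGetD r ((pvParse? x).getD 0) 0 < 4 then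
          PySem.List.pySetD r ((pvParse? x).getD 0) (PySem.List.pyGetD r ((pvParse? x).getD 0) 0 + 1)
        else r) init
      = (lp.map (fun x => (pvParse? x).getD 0)).foldl (fun r i =>
          if PySem.List.pyGetD r i 0 < 4 then PySem.List.pySetD r i (PySem.List.pyGetD r i 0 + 1) else r) init := by
  rw [List.foldl_map]

-- ===== VERDICT (by name: the statement is the Claim_ definition above) =====
theorem get_src_align_count_spec : Claim_equal_get_src_align_count := by
  intro lp sl _ hpre
  unfold Spec_get_src_align_count
  simp only [get_src_align_count, get_src_align_count_alt]
  rw [pvBridge lp (List.replicate sl.toNat (0:Int))]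
  set idxs := lp.map (fun x => (pvParse? x).getD 0) with hidxs
  have hbnd : ∀ a ∈ idxs, 0 ≤ a ∧ a < sl := by
    intro a ha
    obtain ⟨x, hx, rfl⟩ := List.mem_map.1 ha
    have hp := hpre x hx
    cases hpar : pvParse? x with
    | none => rw [hpar] at hp; simp [Option.any] at hp
    | some i =>
      rw [hpar] at hp
      simp [Option.any] at hp
      simpa [hpar] using hp
  have hlenA := pvFoldA_length (PySem.Dict.counter idxs).items (List.replicate sl.toNat (0:Int))
  have hlenB := pvFoldB_length idxs (List.replicate sl.toNat (0:Int))
  have hrep : ∀ j : Nat, (List.replicate sl.toNat (0:Int)).getD j 0 = 0 := by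
    intro j
    simp [List.getD_eq_getElem?_getD, List.getElem?_replicate]
    split <;> rfl
  apply List.ext_getElem (by rw [hlenA, hlenB])
  intro j hjA hjB
  have hjn : j < sl.toNat := by rwa [hlenA, List.length_replicate] at hjA
  rw [← List.getD_eq_getElem _ 0 hjA, ← List.getD_eq_getElem _ 0 hjB]
  rw [pvFoldB_getD idxs _ (by intro a ha; have := hbnd a ha; simp only [List.length_replicate]; omega)
        (by intro j'; rw [hrep j']; norm_num) j]
  rw [PySem.Dict.items_counter idxs]
  rw [pvFoldA_getD _ _ (by rw [List.map_map, show (Prod.fst ∘ fun k : Int => (k, ((idxs.count k : Int)))) = id from rfl, List.map_id]; exact PySem.Set.nodup_ofList idxs)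
        (by intro p hp
            obtain ⟨k, hk, rfl⟩ := List.mem_map.1 hp
            have hm : k ∈ idxs := (PySem.Set.mem_ofList idxs k).1 hk
            have := hbnd k hm
            simp only [List.length_replicate]
            omega) j]
  rw [List.find?_map]
  have hcomp : ((fun p : Int × Int => p.1.toNat == j) ∘ fun k => (k, (idxs.count k : Int)))
      = fun k : Int => k.toNat == j := rfl
  rw [hcomp]
  rw [pvFind_nonneg j _ (fun k hk => (hbnd k ((PySem.Set.mem_ofList idxs k).1 hk)).1)]
  rw [pvCount_toNat j idxs (fun a ha => (hbnd a ha).1)]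
  rw [hrep j]
  by_cases hmem : (j : Int) ∈ idxs
  · have hmem' : (j : Int) ∈ PySem.Set.ofList idxs := (PySem.Set.mem_ofList idxs (j:Int)).2 hmem
    rw [if_pos hmem']
    simp only [Option.map_some]
    rw [zero_add]
  · have hmem' : (j : Int) ∉ PySem.Set.ofList idxs := fun h => hmem ((PySem.Set.mem_ofList idxs (j:Int)).1 h)
    have hc0 : idxs.count ((j : Int)) = 0 := List.count_eq_zero.2 hmem
    rw [if_neg hmem']
    simp only [Option.map_none, hc0]
    norm_num
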